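-- pv_equiv track=rewrite | github.com/FabianJuarez182/Data_Encryption | Laboratorios/Lab1- Encriptado y Decriptado de texto/ParteA/Vigenere.py | generar_clave
-- ===== SOURCE A (Python) =====
-- Diccionario = 'abcdefghijklmnñopqrstuvwxyz'
--
-- def generar_clave(mensaje, clave):
--     """Genera la clave repetida para que coincida con la longitud del mensaje"""
--     clave = clave.lower()
--     clave_repetida = ""
--     j = 0
--
--     for i in range(len(mensaje)):
--         if mensaje[i] in Diccionario:
--             clave_repetida += clave[j % len(clave)]
--             j += 1
--         else:
--             clave_repetida += " "
--     return clave_repetida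
-- ===== SOURCE B (Python) =====
-- Diccionario = 'abcdefghijklmnñopqrstuvwxyz'
--
-- def generar_clave(mensaje, clave):
--     """Genera la clave repetida para que coincida con la longitud del mensaje"""
--     clave = clave.lower()
--     indices = [i for i, c in enumerate(mensaje) if c in Diccionario]
--     resultado = [' '] * len(mensaje)
--     for k, idx in enumerate(indices):
--         resultado[idx] = clave[k % len(clave)]
--     return ''.join(resultado)
-- ===== Notes on version B (the rewrite author's own statement) =====
-- stated objective: alternative
-- what changed: Replaces A's single branching accumulator loop (string concatenation with a running key counter) by a two-pass gather/scatter: first collect the positions of dictionary characters, then scatter the cycled key characters into a preallocated space-filled list.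
import Mathlib
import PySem

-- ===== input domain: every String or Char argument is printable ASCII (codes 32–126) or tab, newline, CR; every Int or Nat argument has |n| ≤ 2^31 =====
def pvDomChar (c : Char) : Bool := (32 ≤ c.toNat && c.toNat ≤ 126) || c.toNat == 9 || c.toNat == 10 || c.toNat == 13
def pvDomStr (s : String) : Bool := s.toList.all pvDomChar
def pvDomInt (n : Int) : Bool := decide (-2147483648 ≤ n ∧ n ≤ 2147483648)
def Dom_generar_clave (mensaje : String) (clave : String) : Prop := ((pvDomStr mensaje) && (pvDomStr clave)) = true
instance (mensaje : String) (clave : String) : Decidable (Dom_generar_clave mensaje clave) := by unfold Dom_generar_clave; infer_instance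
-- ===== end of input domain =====

-- B replaces A's single branching accumulator loop by a two-pass gather/scatter
-- (collect dictionary positions, then scatter cycled key chars into a preallocated
-- space list): an alternative decomposition of the same O(n) task.


-- ===== PORT A =====
-- module-level constant Diccionario (used by both Pythons)
def pvDiccionario : List Char := "abcdefghijklmnñopqrstuvwxyz".toList

-- clave[j % len(clave)]; the ' ' default is unreachable under Pre_ (there Python raises ZeroDivisionError)
def pvKeyChar (clave : List Char) (j : Int) : Char :=
  (PySem.List.pyGet? clave (PySem.Int.mod j (clave.length : Int))).getD ' '

-- A's loop: running accumulator clave_repetida and key counter j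
def pvLoopA (clave : List Char) (acc : List Char) (j : Int) : List Char → List Char
  | [] => acc
  | c :: rest =>
      if pvDiccionario.contains c then pvLoopA clave (acc ++ [pvKeyChar clave j]) (j + 1) rest
      else pvLoopA clave (acc ++ [' ']) j rest

def generar_clave (mensaje : String) (clave : String) : String :=
  String.ofList (pvLoopA (PySem.Chars.lower clave.toList) [] 0 mensaje.toList)

-- ===== PORT B =====
-- indices = [i for i, c in enumerate(mensaje) if c in Diccionario]
def pvIndices (ms : List Char) : List Int :=
  (PySem.List.enumerate ms).filterMap
    (fun p => if pvDiccionario.contains p.2 then some p.1 else none)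

-- for k, idx in enumerate(indices): resultado[idx] = clave[k % len(clave)]
def pvScatter (clave : List Char) (res : List Char) (pairs : List (Int × Int)) : List Char :=
  pairs.foldl (fun r p => r.set p.2.toNat (pvKeyChar clave p.1)) res

def generar_clave_alt (mensaje : String) (clave : String) : String :=
  let cl := PySem.Chars.lower clave.toList
  let ms := mensaje.toList
  String.ofList (pvScatter cl (List.replicate ms.length ' ') (PySem.List.enumerate (pvIndices ms)))

-- ===== PRECONDITION & SPEC =====
-- Pre_ excludes exactly the inputs where Python A raises ZeroDivisionError:
-- an empty clave together with a mensaje containing a dictionary character.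
def Pre_generar_clave (mensaje : String) (clave : String) : Prop :=
  clave.toList ≠ [] ∨ mensaje.toList.all (fun c => ¬ pvDiccionario.contains c)
instance (mensaje : String) (clave : String) : Decidable (Pre_generar_clave mensaje clave) := by
  unfold Pre_generar_clave; infer_instance

def pvWitness_generar_clave : String × String := ("hola, mundo!", "KeY")

def Spec_generar_clave (mensaje : String) (clave : String) (out : String) : Prop := out = generar_clave_alt mensaje clave
instance (mensaje : String) (clave : String) (out : String) : Decidable (Spec_generar_clave mensaje clave out) := by unfold Spec_generar_clave; infer_instance

-- ===== CLAIM (what is proved, stated in full; the proofs are below) =====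
def Claim_equal_generar_clave : Prop := ∀ (mensaje : String) (clave : String), Dom_generar_clave mensaje clave → Pre_generar_clave mensaje clave → Spec_generar_clave mensaje clave (generar_clave mensaje clave)

-- ===== LEMMAS AND PROOFS =====

-- A's loop without the accumulator
def pvGoA (clave : List Char) (j : Int) : List Char → List Char
  | [] => []
  | c :: rest =>
      if pvDiccionario.contains c then pvKeyChar clave j :: pvGoA clave (j + 1) rest
      else ' ' :: pvGoA clave j rest

theorem pvLoopA_eq_goA (clave : List Char) :
    ∀ (cs : List Char) (acc : List Char) (j : Int),
      pvLoopA clave acc j cs = acc ++ pvGoA clave j cs := by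
  intro cs
  induction cs with
  | nil => intro acc j; simp [pvLoopA, pvGoA]
  | cons c rest ih =>
      intro acc j
      by_cases h : c ∈ pvDiccionario <;>
        simp [pvLoopA, pvGoA, h, ih]

-- the filterMap over enumerate started at s is the start-0 one shifted by s
theorem pvIdxFrom_shift :
    ∀ (cs : List Char) (s : Int),
      (PySem.List.enumerate cs s).filterMap
          (fun p => if pvDiccionario.contains p.2 then some p.1 else none)
        = ((PySem.List.enumerate cs 0).filterMap
            (fun p => if pvDiccionario.contains p.2 then some p.1 else none)).map (· + s) := by
  intro cs
  induction cs with
  | nil => intro s; simp [PySem.List.enumerate_nil]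
  | cons c rest ih =>
      intro s
      by_cases h : pvDiccionario.contains c = true
      · simp only [PySem.List.enumerate_cons, List.filterMap_cons, h, reduceIte,
                   List.map_cons, zero_add, ih (s + 1), ih 1, List.map_map]
        congr 1
        apply List.map_congr_left; intro x _; simp [Function.comp]; omega
      · rw [Bool.not_eq_true] at h
        simp only [PySem.List.enumerate_cons, List.filterMap_cons, h, Bool.false_eq_true,
                   if_false, zero_add, ih (s + 1), ih 1, List.map_map]
        apply List.map_congr_left; intro x _; simp [Function.comp]; omega

theorem pvIndices_nil : pvIndices [] = [] := by
  simp [pvIndices, PySem.List.enumerate_nil]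

theorem pvIndices_cons (c : Char) (cs : List Char) :
    pvIndices (c :: cs)
      = (if pvDiccionario.contains c then [(0 : Int)] else []) ++ (pvIndices cs).map (· + 1) := by
  by_cases h : pvDiccionario.contains c = true
  · simp only [pvIndices, PySem.List.enumerate_cons, List.filterMap_cons, h, reduceIte,
               zero_add, pvIdxFrom_shift cs 1, List.singleton_append]
  · rw [Bool.not_eq_true] at h
    simp only [pvIndices, PySem.List.enumerate_cons, List.filterMap_cons, h, Bool.false_eq_true,
               if_false, zero_add, pvIdxFrom_shift cs 1, List.nil_append]

theorem pvIndices_nonneg : ∀ (cs : List Char), ∀ x ∈ pvIndices cs, 0 ≤ x := by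
  intro cs
  induction cs with
  | nil => simp [pvIndices_nil]
  | cons c rest ih =>
      intro x hx
      rw [pvIndices_cons] at hx
      rcases List.mem_append.mp hx with h1 | h1
      · by_cases h : pvDiccionario.contains c = true
        · rw [if_pos h] at h1; simp at h1; omega
        · rw [if_neg h] at h1; simp at h1
      · rcases List.mem_map.mp h1 with ⟨y, hy, rfl⟩
        have := ih y hy; omega

-- enumerate of a mapped list maps the elements, keeping the counters
theorem pvEnumerate_map {α β : Type} (f : α → β) :
    ∀ (xs : List α) (s : Int),
      PySem.List.enumerate (xs.map f) s
        = (PySem.List.enumerate xs s).map (fun p => (p.1, f p.2)) := by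
  intro xs
  induction xs with
  | nil => intro s; simp [PySem.List.enumerate_nil]
  | cons x rest ih => intro s; simp [PySem.List.enumerate_cons, ih]

-- scattering into a cons through indices all shifted by one leaves the head alone
theorem pvScatter_shift (clave : List Char) (a : Char) :
    ∀ (pairs : List (Int × Int)) (l : List Char),
      (∀ p ∈ pairs, 0 ≤ p.2) →
      pvScatter clave (a :: l) (pairs.map (fun p => (p.1, p.2 + 1)))
        = a :: pvScatter clave l pairs := by
  intro pairs
  induction pairs with
  | nil => intro l _; simp [pvScatter]
  | cons p rest ih =>
      intro l hp
      have h2 : (0 : Int) ≤ p.2 := hp p (by simp)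
      have hset : (p.2 + 1).toNat = p.2.toNat + 1 := by omega
      simp only [pvScatter, List.map_cons, List.foldl_cons] at *
      rw [hset, List.set_cons_succ]
      exact ih _ (fun q hq => hp q (by simp [hq]))

-- one scatter step (definitional unfolding of the foldl)
theorem pvScatter_cons (clave : List Char) (res : List Char) (p : Int × Int)
    (pairs : List (Int × Int)) :
    pvScatter clave res (p :: pairs)
      = pvScatter clave (res.set p.2.toNat (pvKeyChar clave p.1)) pairs := rfl

-- the second component of an enumerate entry is a list element
theorem pvSnd_mem_of_mem_enumerate {α : Type} {xs : List α} {s : Int} {p : Int × α}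
    (h : p ∈ PySem.List.enumerate xs s) : p.2 ∈ xs := by
  rw [← PySem.List.map_snd_enumerate xs s]
  exact List.mem_map_of_mem h

-- main invariant: the gather/scatter computes A's loop, for any key phase j
theorem pvScatter_eq_goA (clave : List Char) :
    ∀ (cs : List Char) (j : Int), 0 ≤ j →
      pvScatter clave (List.replicate cs.length ' ') (PySem.List.enumerate (pvIndices cs) j)
        = pvGoA clave j cs := by
  intro cs
  induction cs with
  | nil => intro j _; simp [pvIndices_nil, pvScatter, PySem.List.enumerate_nil, pvGoA]
  | cons c rest ih =>
      intro j hj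
      have hnn : ∀ (s : Int), ∀ p ∈ PySem.List.enumerate (pvIndices rest) s, 0 ≤ p.2 :=
        fun s p hp => pvIndices_nonneg rest p.2 (pvSnd_mem_of_mem_enumerate hp)
      rw [pvIndices_cons]
      by_cases h : pvDiccionario.contains c = true
      · rw [if_pos h]
        rw [List.singleton_append, List.length_cons, List.replicate_succ,
            PySem.List.enumerate_cons, pvScatter_cons]
        have hset : ((' ' : Char) :: List.replicate rest.length ' ').set (0 : Int).toNat
            (pvKeyChar clave j) = pvKeyChar clave j :: List.replicate rest.length ' ' := by
          simp
        rw [hset, pvEnumerate_map (fun x => x + 1) (pvIndices rest) (j + 1)]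
        have hsh := pvScatter_shift clave (pvKeyChar clave j)
          (PySem.List.enumerate (pvIndices rest) (j + 1))
          (List.replicate rest.length ' ') (hnn (j + 1))
        simp only [pvGoA, h, if_pos]
        calc pvScatter clave (pvKeyChar clave j :: List.replicate rest.length ' ')
              ((PySem.List.enumerate (pvIndices rest) (j + 1)).map (fun p => (p.1, p.2 + 1)))
            = pvKeyChar clave j :: pvScatter clave (List.replicate rest.length ' ')
                (PySem.List.enumerate (pvIndices rest) (j + 1)) := hsh
          _ = pvKeyChar clave j :: pvGoA clave (j + 1) rest := by rw [ih (j + 1) (by omega)]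
      · rw [if_neg h]
        rw [List.nil_append, List.length_cons, List.replicate_succ,
            pvEnumerate_map (fun x => x + 1) (pvIndices rest) j]
        have hsh := pvScatter_shift clave ' '
          (PySem.List.enumerate (pvIndices rest) j)
          (List.replicate rest.length ' ') (hnn j)
        simp only [pvGoA, h, if_neg, Bool.false_eq_true, not_false_iff]
        calc pvScatter clave (' ' :: List.replicate rest.length ' ')
              ((PySem.List.enumerate (pvIndices rest) j).map (fun p => (p.1, p.2 + 1)))
            = ' ' :: pvScatter clave (List.replicate rest.length ' ')
                (PySem.List.enumerate (pvIndices rest) j) := hsh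
          _ = ' ' :: pvGoA clave j rest := by rw [ih j hj]

-- ===== VERDICT (by name: the statement is the Claim_ definition above) =====
theorem generar_clave_spec : Claim_equal_generar_clave := by
  intro mensaje clave _ _
  unfold Spec_generar_clave generar_clave generar_clave_alt
  show String.ofList (pvLoopA (PySem.Chars.lower clave.toList) [] 0 mensaje.toList)
      = String.ofList (pvScatter (PySem.Chars.lower clave.toList)
          (List.replicate mensaje.toList.length ' ')
          (PySem.List.enumerate (pvIndices mensaje.toList)))
  rw [pvLoopA_eq_goA, List.nil_append,
      pvScatter_eq_goA (PySem.Chars.lower clave.toList) mensaje.toList 0 le_rfl]
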